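-- pv_equiv track=rewrite | github.com/DonJonMao/R-HAN | mas_treesearch/evaluator.py | _parse_mcq_answer
-- ===== SOURCE A (Python) =====
-- from typing import Dict, List, Optional, Tuple
--
-- def _parse_mcq_answer(final_output: str) -> Tuple[Optional[int], Optional[int]]:
--     option = None
--     confidence = None
--     for raw in final_output.splitlines():
--         line = raw.strip()
--         upper = line.upper()
--         if upper.startswith("OPTION"):
--             try:
--                 option = int(line.split("-", 1)[1].strip())
--             except Exception:
--                 option = None
--         elif upper.startswith("CONFIDENCE"):
--             try:
--                 confidence = int(line.split("-", 1)[1].strip())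
--             except Exception:
--                 confidence = None
--     return option, confidence
-- ===== SOURCE B (Python) =====
-- def _extract(lines, prefix):
--     # Scan from the end: the last matching line fully determines the value
--     # (a parse failure on that line yields None), so return on first hit.
--     for raw in reversed(lines):
--         line = raw.strip()
--         if line.upper().startswith(prefix):
--             try:
--                 return int(line.split("-", 1)[1].strip())
--             except Exception:
--                 return None
--     return None
--
--
-- def _parse_mcq_answer(final_output):
--     lines = final_output.splitlines()
--     return _extract(lines, "OPTION"), _extract(lines, "CONFIDENCE")
-- ===== Notes on version B (the rewrite author's own statement) =====
-- stated objective: alternative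
-- what changed: Replaces the single interleaved forward loop with two independent backward scans that early-return at the first (i.e. last) matching line, exploiting that the last matching line alone determines each value.
import Mathlib
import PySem

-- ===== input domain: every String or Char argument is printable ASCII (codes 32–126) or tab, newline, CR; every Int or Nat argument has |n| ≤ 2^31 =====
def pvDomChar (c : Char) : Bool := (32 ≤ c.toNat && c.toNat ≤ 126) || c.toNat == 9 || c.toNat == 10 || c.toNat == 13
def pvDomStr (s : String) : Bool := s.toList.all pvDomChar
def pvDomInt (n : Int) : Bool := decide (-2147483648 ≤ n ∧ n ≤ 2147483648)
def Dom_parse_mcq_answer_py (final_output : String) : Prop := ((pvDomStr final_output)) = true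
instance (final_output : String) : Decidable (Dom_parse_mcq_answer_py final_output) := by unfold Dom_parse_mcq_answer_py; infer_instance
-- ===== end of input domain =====

-- One honest line: B replaces A's single interleaved forward loop by two independent
-- backward scans that early-return at the first (= last) matching line (objective: alternative).

-- shared try/except body: int(line.split("-", 1)[1].strip()), None on IndexError/ValueError
def pvTryInt (line : String) : Option Int :=
  ((PySem.Str.splitMax? line "-" 1).bind (fun ps => PySem.List.pyGet? ps 1)).bind
    (fun p => PySem.Int.ofStr? (PySem.Str.strip p))

-- ===== PORT A =====
def parse_mcq_answer_py (final_output : String) : Option Int × Option Int :=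
  (PySem.Str.splitlines final_output).foldl
    (fun s raw =>
      let line := PySem.Str.strip raw
      let upper := PySem.Str.upper line
      if PySem.Str.startswith upper "OPTION" then (pvTryInt line, s.2)
      else if PySem.Str.startswith upper "CONFIDENCE" then (s.1, pvTryInt line)
      else s)
    (none, none)

-- ===== PORT B =====
-- 'for raw in reversed(lines): … return …' as structural recursion on the reversed list
def pvExtract (pre : String) : List String → Option Int
  | [] => none
  | raw :: rest =>
      let line := PySem.Str.strip raw
      if PySem.Str.startswith (PySem.Str.upper line) pre then pvTryInt line
      else pvExtract pre rest

def parse_mcq_answer_py_alt (final_output : String) : Option Int × Option Int :=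
  let lines := PySem.Str.splitlines final_output
  (pvExtract "OPTION" lines.reverse, pvExtract "CONFIDENCE" lines.reverse)

-- ===== PRECONDITION & SPEC =====
def Spec_parse_mcq_answer_py (final_output : String) (out : Option Int × Option Int) : Prop := out = parse_mcq_answer_py_alt final_output
instance (final_output : String) (out : Option Int × Option Int) : Decidable (Spec_parse_mcq_answer_py final_output out) := by unfold Spec_parse_mcq_answer_py; infer_instance

-- ===== CLAIM (what is proved, stated in full; the proofs are below) =====
def Claim_equal_parse_mcq_answer_py : Prop := ∀ (final_output : String), Dom_parse_mcq_answer_py final_output → Spec_parse_mcq_answer_py final_output (parse_mcq_answer_py final_output)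

-- ===== LEMMAS AND PROOFS =====

-- a string cannot start with both "OPTION" and "CONFIDENCE" (first characters differ)
lemma pv_not_both (s : List Char)
    (h : PySem.Chars.startswith s ['O', 'P', 'T', 'I', 'O', 'N'] = true) :
    PySem.Chars.startswith s ['C', 'O', 'N', 'F', 'I', 'D', 'E', 'N', 'C', 'E'] = false := by
  cases s with
  | nil => simp [PySem.Chars.startswith, List.isPrefixOf] at h
  | cons c cs =>
    simp only [PySem.Chars.startswith, List.isPrefixOf, Bool.and_eq_true, beq_iff_eq] at h ⊢
    rcases h with ⟨hc, _⟩
    subst hc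
    simp

-- A's fold over any line list equals B's two backward scans
lemma pv_fold_eq (ls : List String) :
    ls.foldl
      (fun s raw =>
        let line := PySem.Str.strip raw
        let upper := PySem.Str.upper line
        if PySem.Str.startswith upper "OPTION" then (pvTryInt line, s.2)
        else if PySem.Str.startswith upper "CONFIDENCE" then (s.1, pvTryInt line)
        else s)
      (none, none)
    = (pvExtract "OPTION" ls.reverse, pvExtract "CONFIDENCE" ls.reverse) := by
  induction ls using List.reverseRecOn with
  | nil => simp [pvExtract]
  | append_singleton l x ih =>
    rw [List.foldl_append, ih, List.reverse_append]
    simp only [List.foldl_cons, List.foldl_nil, List.reverse_singleton, List.singleton_append]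
    by_cases hO : PySem.Chars.startswith (PySem.Chars.upper (PySem.Chars.strip x.toList))
        ['O', 'P', 'T', 'I', 'O', 'N'] = true
    · have hC := pv_not_both _ hO
      simp [pvExtract, hO, hC]
    · by_cases hC : PySem.Chars.startswith (PySem.Chars.upper (PySem.Chars.strip x.toList))
          ['C', 'O', 'N', 'F', 'I', 'D', 'E', 'N', 'C', 'E'] = true
      · simp [pvExtract, hO, hC]
      · simp [pvExtract, hO, hC]

-- ===== VERDICT (by name: the statement is the Claim_ definition above) =====
theorem parse_mcq_answer_py_spec : Claim_equal_parse_mcq_answer_py := by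
  intro fo _
  unfold Spec_parse_mcq_answer_py parse_mcq_answer_py parse_mcq_answer_py_alt
  exact pv_fold_eq (PySem.Str.splitlines fo)
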